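-- pv_equiv track=rewrite | github.com/liliangde/Documents | Python/search_un_use_clsas_and_resourece/FindUnUsedImage.py | get_un_use_svgas
-- ===== SOURCE A (Python) =====
-- def get_un_use_svgas(all_svgas, all_strs):
--     result = []
--     for svga in all_svgas:
--         name = svga.split('.')[0]
--         use = False
--         for s in all_strs:
--             if name in s:
--                 use = True
--                 break
--         if not use:
--             result.append(name)
--     return result
-- ===== SOURCE B (Python) =====
-- def get_un_use_svgas(all_svgas, all_strs):
--     # Inverted traversal: extract all names once, then let each text string
--     # filter the surviving candidates in one pass over the texts.
--     remaining = [svga.split('.')[0] for svga in all_svgas]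
--     for s in all_strs:
--         remaining = [n for n in remaining if n not in s]
--     return remaining
-- ===== Notes on version B (the rewrite author's own statement) =====
-- stated objective: alternative
-- what changed: Inverts the loop nesting: B extracts all names up front and then makes one pass over the text strings, each pass filtering out the candidate names it contains, instead of scanning all texts per name with an early break.
import Mathlib
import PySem

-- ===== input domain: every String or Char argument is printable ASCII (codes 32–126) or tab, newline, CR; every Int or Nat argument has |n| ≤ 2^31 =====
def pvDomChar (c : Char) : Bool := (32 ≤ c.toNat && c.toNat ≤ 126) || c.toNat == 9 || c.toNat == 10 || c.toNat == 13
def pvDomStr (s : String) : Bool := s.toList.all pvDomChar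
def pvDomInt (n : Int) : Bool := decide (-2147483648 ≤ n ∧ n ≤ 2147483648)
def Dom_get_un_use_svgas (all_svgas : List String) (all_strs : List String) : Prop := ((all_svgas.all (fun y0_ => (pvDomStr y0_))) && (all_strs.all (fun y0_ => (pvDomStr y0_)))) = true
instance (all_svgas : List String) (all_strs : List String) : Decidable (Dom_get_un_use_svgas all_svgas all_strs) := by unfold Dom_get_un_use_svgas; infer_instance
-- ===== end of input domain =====

-- ===== PORT A =====
-- B inverts the loop nesting (names extracted once, texts filter the survivors); alternative structure, same cost.
-- inner 'for s in all_strs: if name in s: use=True; break' of A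
def pvA_use (name : String) : List String → Bool
  | [] => false
  | s :: rest => if PySem.Str.isIn name s then true else pvA_use name rest

def get_un_use_svgas (all_svgas : List String) (all_strs : List String) : List String :=
  all_svgas.foldl (fun result svga =>
    let name := ((PySem.Str.split? svga ".").getD []).headD ""
    if pvA_use name all_strs then result else result ++ [name]) []

-- ===== PORT B =====
def get_un_use_svgas_alt (all_svgas : List String) (all_strs : List String) : List String :=
  all_strs.foldl (fun remaining s => remaining.filter (fun n => !(PySem.Str.isIn n s)))
    (all_svgas.map (fun svga => ((PySem.Str.split? svga ".").getD []).headD ""))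

-- ===== PRECONDITION & SPEC =====
def Spec_get_un_use_svgas (all_svgas : List String) (all_strs : List String) (out : List String) : Prop := out = get_un_use_svgas_alt all_svgas all_strs
instance (all_svgas : List String) (all_strs : List String) (out : List String) : Decidable (Spec_get_un_use_svgas all_svgas all_strs out) := by unfold Spec_get_un_use_svgas; infer_instance

-- ===== CLAIM (what is proved, stated in full; the proofs are below) =====
def Claim_equal_get_un_use_svgas : Prop := ∀ (all_svgas : List String) (all_strs : List String), Dom_get_un_use_svgas all_svgas all_strs → Spec_get_un_use_svgas all_svgas all_strs (get_un_use_svgas all_svgas all_strs)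

-- ===== LEMMAS AND PROOFS =====
-- B's fold of filters over the texts is one filter by "no text contains n" (= A's inner loop returning false)
theorem pv_fold_filter (strs : List String) (L : List String) :
    strs.foldl (fun remaining s => remaining.filter (fun n => !(PySem.Str.isIn n s))) L
      = L.filter (fun n => !(pvA_use n strs)) := by
  induction strs generalizing L with
  | nil => simp [pvA_use]
  | cons s t ih =>
    simp only [List.foldl_cons, ih, List.filter_filter]
    congr 1
    funext n
    by_cases h : PySem.Str.isIn n s <;> simp [pvA_use, Bool.and_comm]

-- A's outer fold appends exactly the names whose inner loop returns false
theorem pv_foldA {f : String → String} {p : String → Bool} (svgas : List String) (acc : List String) :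
    svgas.foldl (fun result svga => if p (f svga) then result else result ++ [f svga]) acc
      = acc ++ (svgas.map f).filter (fun n => !(p n)) := by
  induction svgas generalizing acc with
  | nil => simp
  | cons v t ih =>
    simp only [List.foldl_cons, List.map_cons, List.filter_cons]
    cases h : p (f v)
    · simp [ih, List.append_assoc]
    · simp [ih]

-- ===== VERDICT (by name: the statement is the Claim_ definition above) =====
theorem get_un_use_svgas_spec : Claim_equal_get_un_use_svgas := by
  intro all_svgas all_strs _
  unfold Spec_get_un_use_svgas get_un_use_svgas get_un_use_svgas_alt
  rw [pv_fold_filter,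
    pv_foldA (f := fun svga => ((PySem.Str.split? svga ".").getD []).headD "")
      (p := fun name => pvA_use name all_strs)]
  simp
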